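-- pv_equiv track=rewrite | github.com/ftsrg/mbse-assistant | agent_evaluation/create_result_plots.py | infer_question_set_pairs
-- ===== SOURCE A (Python) =====
-- def infer_question_set_pairs(question_sets: list[str]) -> list[tuple[str, str]]:
--     """
--     Detect original-vs-mutant question-set pairs.
--
--     Assumption:
--         `<name>_questions` pairs with `<name>_mutant_questions`.
--     """
--     normalized = sorted({str(qs) for qs in question_sets if str(qs).strip()})
--     available = set(normalized)
--     pairs: list[tuple[str, str]] = []
--
--     for qs in normalized:
--         if not qs.endswith("_questions"):
--             continue
--         if qs.endswith("_mutant_questions"):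
--             continue
--         mutant = qs[: -len("_questions")] + "_mutant_questions"
--         if mutant in available:
--             pairs.append((qs, mutant))
--
--     return pairs
-- ===== SOURCE B (Python) =====
-- def infer_question_set_pairs(question_sets: list[str]) -> list[tuple[str, str]]:
--     """Sort-merge join: two sorted streams (originals, and the original each
--     mutant expects) intersected with a two-pointer merge."""
--     Q = "_questions"
--     MQ = "_mutant_questions"
--     originals = sorted({str(s) for s in question_sets
--                         if str(s).endswith(Q) and not str(s).endswith(MQ)})
--     expected = sorted({str(s)[:-len(MQ)] + Q for s in question_sets
--                        if str(s).endswith(MQ)})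
--     pairs: list[tuple[str, str]] = []
--     i = j = 0
--     while i < len(originals) and j < len(expected):
--         a, b = originals[i], expected[j]
--         if a < b:
--             i += 1
--         elif b < a:
--             j += 1
--         else:
--             pairs.append((a, a[:-len(Q)] + MQ))
--             i += 1
--             j += 1
--     return pairs
-- ===== Notes on version B (the rewrite author's own statement) =====
-- stated objective: alternative
-- what changed: B replaces A's sort-everything-then-rescan-with-hash-membership by a sort-merge join: it builds two strictly sorted lists (the original names, and the original name each mutant implies) and intersects them with a two-pointer merge, emitting pairs during the merge with no membership lookups.
import Mathlib
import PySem

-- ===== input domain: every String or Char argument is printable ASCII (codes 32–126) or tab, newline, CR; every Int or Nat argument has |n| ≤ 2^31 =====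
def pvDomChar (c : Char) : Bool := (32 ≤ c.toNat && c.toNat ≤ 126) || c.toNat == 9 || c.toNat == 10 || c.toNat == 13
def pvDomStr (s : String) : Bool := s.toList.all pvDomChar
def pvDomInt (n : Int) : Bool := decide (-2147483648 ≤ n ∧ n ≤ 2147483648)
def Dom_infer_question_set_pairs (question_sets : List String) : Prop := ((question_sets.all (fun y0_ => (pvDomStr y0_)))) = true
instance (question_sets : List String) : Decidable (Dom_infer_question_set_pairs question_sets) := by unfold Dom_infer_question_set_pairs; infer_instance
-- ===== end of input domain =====

-- B replaces A's sort-then-rescan-with-set-membership by a sort-merge join: two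
-- strictly sorted lists (originals, expected originals from mutants) intersected
-- by a two-pointer merge (objective: alternative algorithm, same asymptotic cost).


-- ===== PORT A =====
def infer_question_set_pairs (question_sets : List String) : List (String × String) :=
  let normalized := PySem.List.sorted
    (PySem.Set.ofList (question_sets.filter (fun qs => !(PySem.Str.strip qs == "")))) (fun x => x)
  let available := PySem.Set.ofList normalized
  normalized.foldl (fun pairs qs =>
    if !(PySem.Str.endswith qs "_questions") then pairs
    else if PySem.Str.endswith qs "_mutant_questions" then pairs
    else
      let mutant := PySem.Str.slice qs none (some (-10)) ++ "_mutant_questions"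
      if PySem.Set.contains available mutant then pairs ++ [(qs, mutant)] else pairs) []

-- ===== PORT B =====
-- one merge step of B's two-pointer while loop (i/j advance = structural tails)
def pvMergePairs : List String → List String → List (String × String)
  | [], _ => []
  | _ :: _, [] => []
  | a :: as, b :: bs =>
    if a < b then pvMergePairs as (b :: bs)
    else if b < a then pvMergePairs (a :: as) bs
    else (a, PySem.Str.slice a none (some (-10)) ++ "_mutant_questions") :: pvMergePairs as bs

def infer_question_set_pairs_alt (question_sets : List String) : List (String × String) :=
  let originals := PySem.List.sorted
    (PySem.Set.ofList (question_sets.filter (fun s =>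
      PySem.Str.endswith s "_questions" && !PySem.Str.endswith s "_mutant_questions"))) (fun x => x)
  let expected := PySem.List.sorted
    (PySem.Set.ofList ((question_sets.filter (fun s =>
      PySem.Str.endswith s "_mutant_questions")).map (fun s =>
        PySem.Str.slice s none (some (-17)) ++ "_questions"))) (fun x => x)
  pvMergePairs originals expected

-- ===== PRECONDITION & SPEC =====
def Spec_infer_question_set_pairs (question_sets : List String) (out : List (String × String)) : Prop := out = infer_question_set_pairs_alt question_sets
instance (question_sets : List String) (out : List (String × String)) : Decidable (Spec_infer_question_set_pairs question_sets out) := by unfold Spec_infer_question_set_pairs; infer_instance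

-- ===== CLAIM (what is proved, stated in full; the proofs are below) =====
def Claim_equal_infer_question_set_pairs : Prop := ∀ (question_sets : List String), Dom_infer_question_set_pairs question_sets → Spec_infer_question_set_pairs question_sets (infer_question_set_pairs question_sets)

-- ===== LEMMAS AND PROOFS =====

-- if strip s is empty then every char is whitespace
theorem pv_strip_all_space (s : List Char) (h : PySem.Chars.strip s = []) :
    ∀ x ∈ s, PySem.Chars.isspace x = true := by
  unfold PySem.Chars.strip PySem.Chars.rstrip PySem.Chars.lstrip at h
  have h2 : ∀ x ∈ (List.dropWhile PySem.Chars.isspace s), PySem.Chars.isspace x = true := by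
    have := (List.reverse_eq_nil_iff).mp h
    have := List.dropWhile_eq_nil_iff.mp this
    intro x hx
    exact this x (by simpa using hx)
  intro x hx
  have hx' : x ∈ List.takeWhile PySem.Chars.isspace s ++ List.dropWhile PySem.Chars.isspace s := by
    rw [List.takeWhile_append_dropWhile]; exact hx
  rcases List.mem_append.mp hx' with h1 | h1
  · exact List.mem_takeWhile_imp h1
  · exact h2 x h1

-- a string containing '_' survives the strip() filter
theorem pv_underscore_strip (s : String) (h : ('_' : Char) ∈ s.toList) :
    (!(PySem.Str.strip s == "")) = true := by
  simp only [Bool.not_eq_eq_eq_not, Bool.not_true, beq_eq_false_iff_ne, ne_eq]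
  intro he
  have : (PySem.Str.strip s).toList = [] := by rw [he]; rfl
  rw [PySem.Str.toList_strip] at this
  have := pv_strip_all_space s.toList this '_' h
  simp [PySem.Chars.isspace] at this

theorem pv_mem_of_endsQ (s : String) (h : PySem.Str.endswith s "_questions" = true) :
    ('_' : Char) ∈ s.toList := by
  rw [PySem.Str.endswith_eq] at h
  have hs := (PySem.Chars.endswith_iff _ _).mp h
  exact hs.subset (by decide)

theorem pv_mem_of_endsMQ (s : String) (h : PySem.Str.endswith s "_mutant_questions" = true) :
    ('_' : Char) ∈ s.toList := by
  rw [PySem.Str.endswith_eq] at h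
  have hs := (PySem.Chars.endswith_iff _ _).mp h
  exact hs.subset (by decide)

theorem pv_endswith_MQ_append (b : String) :
    PySem.Str.endswith (b ++ "_mutant_questions") "_mutant_questions" = true := by
  rw [PySem.Str.endswith_eq]
  refine (PySem.Chars.endswith_iff _ _).mpr ?_
  rw [String.toList_append]
  exact List.suffix_append _ _

theorem pv_b17_append (b : String) :
    PySem.Str.slice (b ++ "_mutant_questions") none (some (-17)) = b := by
  have h : (PySem.Str.slice (b ++ "_mutant_questions") none (some (-17))).toList = b.toList := by
    rw [PySem.Str.toList_slice, PySem.Chars.slice_eq_listSlice,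
        PySem.List.slice_to_neg_ofNat _ 17 (by omega), String.toList_append]
    simp
  exact String.toList_injective h

theorem pv_b17_reconstruct (m : String)
    (h : PySem.Str.endswith m "_mutant_questions" = true) :
    PySem.Str.slice m none (some (-17)) ++ "_mutant_questions" = m := by
  rw [PySem.Str.endswith_eq] at h
  obtain ⟨pre, hpre⟩ := (PySem.Chars.endswith_iff _ _).mp h
  have hlen : m.toList.length = pre.length + 17 := by
    rw [← hpre]; simp
  have h1 : (PySem.Str.slice m none (some (-17))).toList = pre := by
    rw [PySem.Str.toList_slice, PySem.Chars.slice_eq_listSlice,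
        PySem.List.slice_to_neg_ofNat _ 17 (by omega), hlen, ← hpre]
    simp
  refine String.toList_injective ?_
  rw [String.toList_append, h1, hpre]

theorem pv_b10_append (b : String) :
    PySem.Str.slice (b ++ "_questions") none (some (-10)) = b := by
  have h : (PySem.Str.slice (b ++ "_questions") none (some (-10))).toList = b.toList := by
    rw [PySem.Str.toList_slice, PySem.Chars.slice_eq_listSlice,
        PySem.List.slice_to_neg_ofNat _ 10 (by omega), String.toList_append]
    simp
  exact String.toList_injective h

theorem pv_b10_reconstruct (m : String)
    (h : PySem.Str.endswith m "_questions" = true) :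
    PySem.Str.slice m none (some (-10)) ++ "_questions" = m := by
  rw [PySem.Str.endswith_eq] at h
  obtain ⟨pre, hpre⟩ := (PySem.Chars.endswith_iff _ _).mp h
  have hlen : m.toList.length = pre.length + 10 := by
    rw [← hpre]; simp
  have h1 : (PySem.Str.slice m none (some (-10))).toList = pre := by
    rw [PySem.Str.toList_slice, PySem.Chars.slice_eq_listSlice,
        PySem.List.slice_to_neg_ofNat _ 10 (by omega), hlen, ← hpre]
    simp
  refine String.toList_injective ?_
  rw [String.toList_append, h1, hpre]

-- A's loop body as a single guarded append
theorem pv_foldA (n : List String) (av : PySem.Set String) (acc : List (String × String)) :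
    n.foldl (fun pairs qs =>
      if !(PySem.Str.endswith qs "_questions") then pairs
      else if PySem.Str.endswith qs "_mutant_questions" then pairs
      else
        let mutant := PySem.Str.slice qs none (some (-10)) ++ "_mutant_questions"
        if PySem.Set.contains av mutant then pairs ++ [(qs, mutant)] else pairs) acc
    = acc ++ (n.filter (fun qs => PySem.Str.endswith qs "_questions" &&
            (!PySem.Str.endswith qs "_mutant_questions" &&
             PySem.Set.contains av (PySem.Str.slice qs none (some (-10)) ++ "_mutant_questions")))).map
        (fun qs => (qs, PySem.Str.slice qs none (some (-10)) ++ "_mutant_questions")) := by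
  rw [← PySem.List.foldl_append_if]
  apply PySem.List.foldl_congr_mem
  intro pairs qs _
  cases h1 : PySem.Str.endswith qs "_questions" <;>
  cases h2 : PySem.Str.endswith qs "_mutant_questions" <;>
  cases h3 : PySem.Set.contains av (PySem.Str.slice qs none (some (-10)) ++ "_mutant_questions") <;>
    (simp only [h1, h2, h3]; simp)

-- the merge of two strictly increasing lists is a filter-by-membership
theorem pv_merge_eq (xs ys : List String)
    (hx : xs.Pairwise (· < ·)) (hy : ys.Pairwise (· < ·)) :
    pvMergePairs xs ys
      = (xs.filter (fun a => decide (a ∈ ys))).map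
          (fun a => (a, PySem.Str.slice a none (some (-10)) ++ "_mutant_questions")) := by
  induction xs, ys using pvMergePairs.induct with
  | case1 ys => simp [pvMergePairs]
  | case2 a as => simp [pvMergePairs]
  | case3 a as b bs hlt ih =>
    have hna : a ∉ b :: bs := by
      intro hmem
      rcases List.mem_cons.mp hmem with rfl | hm
      · exact lt_irrefl _ hlt
      · exact lt_irrefl _ (lt_trans hlt (List.rel_of_pairwise_cons hy hm))
    rw [pvMergePairs, if_pos hlt, ih hx.of_cons hy, List.filter_cons, decide_eq_false hna]
    simp
  | case4 a as b bs hlt1 hlt2 ih =>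
    rw [pvMergePairs, if_neg hlt1, if_pos hlt2, ih hx hy.of_cons]
    apply congrArg
    apply List.filter_congr
    intro y hy'
    have hay : a ≤ y := by
      rcases List.mem_cons.mp hy' with rfl | hm
      · exact le_refl _
      · exact le_of_lt (List.rel_of_pairwise_cons hx hm)
    have hby : b < y := lt_of_lt_of_le hlt2 hay
    refine decide_eq_decide.mpr ?_
    constructor
    · exact List.mem_cons_of_mem _
    · intro hm
      rcases List.mem_cons.mp hm with rfl | hm
      · exact absurd hby (lt_irrefl _)
      · exact hm
  | case5 a as b bs hlt1 hlt2 ih =>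
    have hab : a = b := le_antisymm (not_lt.mp hlt2) (not_lt.mp hlt1)
    subst hab
    rw [pvMergePairs, if_neg hlt1, if_neg hlt2, ih hx.of_cons hy.of_cons]
    have hfa : (a :: as).filter (fun y => decide (y ∈ a :: bs))
        = a :: as.filter (fun y => decide (y ∈ bs)) := by
      rw [List.filter_cons, decide_eq_true (List.mem_cons_self)]
      rw [if_pos rfl]
      congr 1
      apply List.filter_congr
      intro y hy'
      have hay : a < y := List.rel_of_pairwise_cons hx hy'
      refine decide_eq_decide.mpr ?_
      constructor
      · intro hm
        rcases List.mem_cons.mp hm with rfl | hm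
        · exact absurd hay (lt_irrefl _)
        · exact hm
      · exact List.mem_cons_of_mem _
    rw [hfa, List.map_cons]

-- B's originals list is the originals filter of A's normalized list
theorem pv_origEq (qss : List String) :
    PySem.List.sorted (PySem.Set.ofList (qss.filter (fun s =>
      PySem.Str.endswith s "_questions" && !PySem.Str.endswith s "_mutant_questions"))) (fun x => x)
    = (PySem.List.sorted (PySem.Set.ofList (qss.filter (fun qs => !(PySem.Str.strip qs == "")))) (fun x => x)).filter
        (fun qs => PySem.Str.endswith qs "_questions" && !PySem.Str.endswith qs "_mutant_questions") := by
  have hnodupN : (PySem.List.sorted (PySem.Set.ofList (qss.filter (fun qs => !(PySem.Str.strip qs == "")))) (fun x => x)).Nodup :=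
    (PySem.List.sorted_perm _ _ _).nodup_iff.mpr (PySem.Set.nodup_ofList _)
  apply PySem.List.sorted_eq_of_perm_of_pairwise_lt
  · refine (List.perm_ext_iff_of_nodup (hnodupN.filter _) (PySem.Set.nodup_ofList _)).mpr ?_
    intro a
    rw [List.mem_filter, PySem.List.mem_sorted, PySem.Set.mem_ofList, List.mem_filter,
        PySem.Set.mem_ofList, List.mem_filter]
    constructor
    · rintro ⟨⟨ha, _⟩, hb⟩
      exact ⟨ha, hb⟩
    · rintro ⟨ha, hb⟩
      rcases Bool.and_eq_true_iff.mp hb with ⟨hq, _⟩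
      exact ⟨⟨ha, pv_underscore_strip a (pv_mem_of_endsQ a hq)⟩, hb⟩
  · exact (PySem.List.sorted_ofList_pairwise_lt _).filter _

-- for an original name, membership in B's expected list = A's membership test of the mutant
theorem pv_mem_equiv (qss : List String) (x : String)
    (hq : PySem.Str.endswith x "_questions" = true) :
    x ∈ PySem.List.sorted (PySem.Set.ofList ((qss.filter (fun s =>
        PySem.Str.endswith s "_mutant_questions")).map (fun s =>
          PySem.Str.slice s none (some (-17)) ++ "_questions"))) (fun x => x)
    ↔ PySem.Set.contains
        (PySem.Set.ofList (PySem.List.sorted (PySem.Set.ofList (qss.filter (fun qs => !(PySem.Str.strip qs == "")))) (fun x => x)))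
        (PySem.Str.slice x none (some (-10)) ++ "_mutant_questions") = true := by
  rw [PySem.List.mem_sorted, PySem.Set.mem_ofList, List.mem_map]
  simp only [PySem.Set.contains, List.contains_eq_mem, decide_eq_true_eq,
    PySem.Set.mem_ofList, PySem.List.mem_sorted, List.mem_filter]
  constructor
  · rintro ⟨s, ⟨hsq, hmq⟩, hsx⟩
    -- s = x[:-10] ++ "_mutant_questions"
    have hbase : PySem.Str.slice x none (some (-10)) = PySem.Str.slice s none (some (-17)) := by
      rw [← hsx, pv_b10_append]
    have hseq : PySem.Str.slice x none (some (-10)) ++ "_mutant_questions" = s := by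
      rw [hbase]; exact pv_b17_reconstruct s hmq
    rw [hseq]
    exact ⟨hsq, pv_underscore_strip s (pv_mem_of_endsMQ s hmq)⟩
  · rintro ⟨hm, _⟩
    refine ⟨PySem.Str.slice x none (some (-10)) ++ "_mutant_questions",
      ⟨hm, pv_endswith_MQ_append _⟩, ?_⟩
    rw [pv_b17_append]
    exact pv_b10_reconstruct x hq

-- ===== VERDICT (by name: the statement is the Claim_ definition above) =====
theorem infer_question_set_pairs_spec : Claim_equal_infer_question_set_pairs := by
  intro qss _
  unfold Spec_infer_question_set_pairs
  show infer_question_set_pairs qss = infer_question_set_pairs_alt qss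
  simp only [infer_question_set_pairs, infer_question_set_pairs_alt]
  rw [pv_foldA, List.nil_append,
      pv_merge_eq _ _ (PySem.List.sorted_ofList_pairwise_lt _) (PySem.List.sorted_ofList_pairwise_lt _),
      pv_origEq, List.filter_filter]
  apply congrArg
  apply List.filter_congr
  intro x _
  have hmem := pv_mem_equiv qss x
  cases h1 : PySem.Str.endswith x "_questions" <;>
  cases h2 : PySem.Str.endswith x "_mutant_questions"
  all_goals simp only [h1, h2, Bool.not_true, Bool.not_false, Bool.true_and, Bool.and_true,
    Bool.false_and, Bool.and_false]
  all_goals first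
    | rfl
    | (rw [Bool.eq_iff_iff]
       simp only [decide_eq_true_eq]
       exact (hmem h1).symm)
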